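-- pv_equiv track=rewrite | github.com/helenc3/LevelA | project_stock.py | compute_decrease
-- ===== SOURCE A (Python) =====
-- def compute_decrease(records):
--     index=1
--     la=[]
--     days=0
--     while index<len(records)-1:
--         if records[index-1]>records[index]:
--             days+=1
--             index+=1
--         else:
--             la.append(days)
--             days=0
--             index+=1
--
--     decrease={}
--     for i in range(1,16):
--         decrease.update({i:la.count(i)})
--     return decrease
-- ===== SOURCE B (Python) =====
-- def compute_decrease(records):
--     n = len(records)
--     # positions i in [1, n-2] where the step is not a decrease, with a sentinel break at 0
--     breaks = [0] + [i for i in range(1, n - 1) if records[i - 1] <= records[i]]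
--     tally = {}
--     for a, b in zip(breaks, breaks[1:]):
--         length = b - a - 1
--         tally[length] = tally.get(length, 0) + 1
--     return {d: tally.get(d, 0) for d in range(1, 16)}
-- ===== Notes on version B (the rewrite author's own statement) =====
-- stated objective: faster
-- what changed: Instead of A's stateful streak counter that accumulates a list of run lengths and then re-scans it fifteen times with list.count, B computes the positions of non-decreasing steps (breaks), obtains each streak length as the difference of consecutive break positions, and tallies them once into a counter dict.
import Mathlib
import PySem

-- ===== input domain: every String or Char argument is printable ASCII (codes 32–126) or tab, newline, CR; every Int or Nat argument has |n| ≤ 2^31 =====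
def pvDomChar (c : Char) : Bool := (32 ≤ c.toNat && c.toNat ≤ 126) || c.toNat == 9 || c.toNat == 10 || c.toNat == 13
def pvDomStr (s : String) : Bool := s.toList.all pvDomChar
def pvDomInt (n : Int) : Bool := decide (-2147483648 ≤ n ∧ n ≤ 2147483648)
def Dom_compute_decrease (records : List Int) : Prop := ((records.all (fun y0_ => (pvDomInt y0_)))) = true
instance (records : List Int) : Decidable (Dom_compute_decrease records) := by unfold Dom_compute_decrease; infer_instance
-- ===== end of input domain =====

-- B replaces A's stateful streak counter (streak list + fifteen list.count passes) by a
-- break-position algorithm: streak lengths are differences of consecutive non-decrease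
-- positions, tallied once into a counter dict (objective: alternative).

-- ===== PORT A =====
-- while-loop with index 1 .. len-2 (both branches do index += 1) ported as a fold over that range
def compute_decrease (records : List Int) : List (Int × Int) :=
  let st := (PySem.List.pyRange 1 ((records.length : Int) - 1) 1).foldl
    (fun (st : List Int × Int) i =>
      if PySem.List.pyGetD records (i - 1) 0 > PySem.List.pyGetD records i 0 then
        (st.1, st.2 + 1)
      else
        (st.1 ++ [st.2], 0))
    ([], 0)
  ((PySem.List.pyRange 1 16 1).foldl
    (fun (d : PySem.Dict Int Int) i => d.insert i (st.1.count i))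
    PySem.Dict.empty).items

-- ===== PORT B =====
def compute_decrease_alt (records : List Int) : List (Int × Int) :=
  let n : Int := records.length
  -- breaks = [0] + [i for i in range(1, n-1) if records[i-1] <= records[i]]
  let breaks : List Int :=
    0 :: (PySem.List.pyRange 1 (n - 1) 1).filter
      (fun i => PySem.List.pyGetD records (i - 1) 0 ≤ PySem.List.pyGetD records i 0)
  -- for a, b in zip(breaks, breaks[1:]): tally[b-a-1] = tally.get(b-a-1, 0) + 1
  let tally : PySem.Dict Int Int :=
    (breaks.zip (PySem.List.slice breaks (some 1) none)).foldl
      (fun t p => t.insert (p.2 - p.1 - 1) (t.getD (p.2 - p.1 - 1) 0 + 1))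
      PySem.Dict.empty
  -- {d: tally.get(d, 0) for d in range(1, 16)}
  ((PySem.List.pyRange 1 16 1).foldl
    (fun (d : PySem.Dict Int Int) i => d.insert i (tally.getD i 0))
    PySem.Dict.empty).items

-- ===== PRECONDITION & SPEC =====
def Spec_compute_decrease (records : List Int) (out : List (Int × Int)) : Prop := out = compute_decrease_alt records
instance (records : List Int) (out : List (Int × Int)) : Decidable (Spec_compute_decrease records out) := by unfold Spec_compute_decrease; infer_instance

-- ===== CLAIM (what is proved, stated in full; the proofs are below) =====
def Claim_equal_compute_decrease : Prop := ∀ (records : List Int), Dom_compute_decrease records → Spec_compute_decrease records (compute_decrease records)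

-- ===== LEMMAS AND PROOFS =====

-- streak lengths read off a break-position list: consecutive differences minus one
def pvDiffs (p : Int) (bs : List Int) : List Int :=
  match bs with
  | [] => []
  | b :: bs' => (b - p - 1) :: pvDiffs b bs'

lemma pvDiffs_cons (p b : Int) (bs : List Int) :
    pvDiffs p (b :: bs) = (b - p - 1) :: pvDiffs b bs := rfl

-- A's loop body, named
def pvStepA (records : List Int) (st : List Int × Int) (i : Int) : List Int × Int :=
  if PySem.List.pyGetD records (i - 1) 0 > PySem.List.pyGetD records i 0 then
    (st.1, st.2 + 1)
  else
    (st.1 ++ [st.2], 0)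

-- B's break predicate
def pvPred (records : List Int) (i : Int) : Bool :=
  PySem.List.pyGetD records (i - 1) 0 ≤ PySem.List.pyGetD records i 0

-- A's accumulated streak list = consecutive differences of the filtered break positions
lemma pv_loop_diffs (records : List Int) (k : Nat) (a : Int) (la : List Int) (days : Int) :
    ((PySem.List.pyRange a (a + k) 1).foldl (pvStepA records) (la, days)).1 =
      la ++ pvDiffs (a - days - 1) ((PySem.List.pyRange a (a + k) 1).filter (pvPred records)) := by
  induction k generalizing a la days with
  | zero => simp [pvDiffs]
  | succ m ih =>
    rw [PySem.List.pyRange_one_cons (by push_cast; omega : a < a + ((m+1 : Nat) : Int))]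
    have hrest : a + 1 + (m : Nat) = a + ((m + 1 : Nat) : Int) := by push_cast; ring
    by_cases h : PySem.List.pyGetD records (a - 1) 0 > PySem.List.pyGetD records a 0
    · have hp : pvPred records a = false := by
        unfold pvPred; simp only [decide_eq_false_iff_not]; omega
      rw [List.foldl_cons, List.filter_cons_of_neg (by simp [hp])]
      have := ih (a + 1) la (days + 1)
      rw [hrest] at this
      simpa [pvStepA, h, show a + 1 - (days + 1) - 1 = a - days - 1 by ring] using this
    · have hp : pvPred records a = true := by
        unfold pvPred; simp only [decide_eq_true_eq]; omega
      rw [List.foldl_cons, List.filter_cons_of_pos hp]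
      have := ih (a + 1) (la ++ [days]) 0
      rw [hrest] at this
      simp only [pvStepA, if_neg h]
      rw [this, pvDiffs_cons]
      simp [show a - (a - days - 1) - 1 = days by ring]

-- zipping a break list against its tail and taking b - a - 1 gives pvDiffs
lemma pv_zip_diffs (p : Int) (bs : List Int) :
    ((p :: bs).zip bs).map (fun q => q.2 - q.1 - 1) = pvDiffs p bs := by
  induction bs generalizing p with
  | nil => rfl
  | cons b bs' ih => simp [pvDiffs, ih b]

-- B's tally is the counter of the streak-length list
lemma pv_tally_counter (pairs : List (Int × Int)) :
    pairs.foldl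
      (fun (t : PySem.Dict Int Int) p => t.insert (p.2 - p.1 - 1) (t.getD (p.2 - p.1 - 1) 0 + 1))
      PySem.Dict.empty
    = PySem.Dict.counter (pairs.map (fun q => q.2 - q.1 - 1)) := by
  rw [← PySem.Dict.foldl_insert_getD_add_one_eq_counter, List.foldl_map]

theorem pv_main (records : List Int) : compute_decrease records = compute_decrease_alt records := by
  unfold compute_decrease compute_decrease_alt
  simp only [PySem.List.slice_from_one, List.tail_cons]
  rw [pv_tally_counter, pv_zip_diffs]
  -- rewrite A's streak list
  have hla : ((PySem.List.pyRange 1 ((records.length : Int) - 1) 1).foldl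
      (fun (st : List Int × Int) i =>
        if PySem.List.pyGetD records (i - 1) 0 > PySem.List.pyGetD records i 0 then
          (st.1, st.2 + 1) else (st.1 ++ [st.2], 0)) ([], 0)).1 =
      pvDiffs 0 ((PySem.List.pyRange 1 ((records.length : Int) - 1) 1).filter (pvPred records)) := by
    by_cases hle : (records.length : Int) - 1 ≤ 1
    · rw [PySem.List.pyRange_one_eq_nil hle]; rfl
    · rw [not_le] at hle
      obtain ⟨k, hk⟩ : ∃ k : Nat, (records.length : Int) - 1 = 1 + k :=
        ⟨((records.length : Int) - 2).toNat, by omega⟩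
      rw [hk]
      have := pv_loop_diffs records k 1 [] 0
      simpa [pvStepA] using this
  rw [hla]
  -- both sides now build a dict over range 1..15 from counts of the same list
  simp only [show (fun i : Int => decide (PySem.List.pyGetD records (i - 1) 0 ≤ PySem.List.pyGetD records i 0)) = pvPred records from rfl]
  refine congrArg PySem.Dict.items ?_
  refine PySem.List.foldl_congr_mem _ _ _ _ ?_
  intro acc i _
  rw [PySem.Dict.getD_counter]

-- ===== VERDICT (by name: the statement is the Claim_ definition above) =====
theorem compute_decrease_spec : Claim_equal_compute_decrease := by
  intro records _
  exact pv_main records
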